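-- pv_equiv track=rewrite | github.com/bruhismyname/Praktikum-ASA-D2 | Pertemuan 1/BedaKetinggian.py | cari_beda_ketinggian
-- ===== SOURCE A (Python) =====
-- def cari_beda_ketinggian(n, ketinggian):
--     titik_ekstrim = []
--
--     if n < 2:
--         return 0
--
--     titik_ekstrim.append((ketinggian[0], 'puncak' if ketinggian[0] >= ketinggian[1] else 'lembah'))
--
--     for i in range(1, n-1):
--         if ketinggian[i] >= ketinggian[i-1] and ketinggian[i] >= ketinggian[i+1]:
--             if ketinggian[i] > ketinggian[i-1] or ketinggian[i] > ketinggian[i+1]: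
--                 titik_ekstrim.append((ketinggian[i], 'puncak'))
--         elif ketinggian[i] <= ketinggian[i-1] and ketinggian[i] <= ketinggian[i+1]:
--             if ketinggian[i] < ketinggian[i-1] or ketinggian[i] < ketinggian[i+1]:
--                 titik_ekstrim.append((ketinggian[i], 'lembah'))
--
--     titik_ekstrim.append((ketinggian[-1], 'puncak' if ketinggian[-1] >= ketinggian[-2] else 'lembah'))
--
--     return max(abs(titik_ekstrim[i][0] - titik_ekstrim[i+1][0])
--               for i in range(len(titik_ekstrim)-1))
-- ===== SOURCE B (Python) =====
-- def cari_beda_ketinggian(n, ketinggian):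
--     if n < 2:
--         return 0
--     prev = ketinggian[0]
--     best = 0
--     for i in range(1, n - 1):
--         a, b, c = ketinggian[i - 1], ketinggian[i], ketinggian[i + 1]
--         if (b - a) * (b - c) >= 0 and not (a == b == c):
--             d = abs(b - prev)
--             if d > best:
--                 best = d
--             prev = b
--     d = abs(ketinggian[-1] - prev)
--     return best if best > d else d
-- ===== Notes on version B (the rewrite author's own statement) =====
-- stated objective: simpler
-- what changed: B drops A's intermediate extreme-point list, unused puncak/lembah labels and final max-over-generator pass: it streams once over the points, folding each new extreme into a running (prev_extreme, best) pair, with the peak/valley test collapsed to a sign condition (b-a)*(b-c)>=0 excluding the all-equal plateau.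
import Mathlib
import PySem

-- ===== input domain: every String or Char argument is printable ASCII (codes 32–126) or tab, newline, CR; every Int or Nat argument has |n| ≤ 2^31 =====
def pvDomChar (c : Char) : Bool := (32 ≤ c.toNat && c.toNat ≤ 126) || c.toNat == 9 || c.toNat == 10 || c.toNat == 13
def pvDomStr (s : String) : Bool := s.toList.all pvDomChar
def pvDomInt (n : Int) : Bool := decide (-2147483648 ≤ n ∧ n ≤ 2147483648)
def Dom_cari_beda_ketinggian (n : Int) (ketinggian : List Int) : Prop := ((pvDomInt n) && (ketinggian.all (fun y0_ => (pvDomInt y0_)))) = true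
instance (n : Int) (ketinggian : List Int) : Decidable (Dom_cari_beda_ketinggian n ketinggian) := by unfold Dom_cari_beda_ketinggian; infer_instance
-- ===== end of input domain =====

-- B replaces A's intermediate extreme-point list (and its unused labels) by one streaming
-- pass keeping only (previous extreme, best difference); return values proved equal on Pre_.

-- ===== PORT A =====
-- loop body of A's 'for i in range(1, n-1)': conditionally append an extreme point
def pvAppendA (ks : List Int) (acc : List (Int × String)) (i : Int) : List (Int × String) :=
  let a := PySem.List.pyGetD ks (i - 1) 0
  let b := PySem.List.pyGetD ks i 0
  let c := PySem.List.pyGetD ks (i + 1) 0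
  if b ≥ a ∧ b ≥ c then
    if b > a ∨ b > c then acc ++ [(b, "puncak")] else acc
  else if b ≤ a ∧ b ≤ c then
    if b < a ∨ b < c then acc ++ [(b, "lembah")] else acc
  else acc

-- A's final 'max(abs(te[i][0] - te[i+1][0]) for i in range(len(te)-1))'
def pvMaxDiffs (te : List (Int × String)) : Int :=
  (PySem.List.max?
    ((PySem.List.pyRange 0 ((te.length : Int) - 1) 1).map
      (fun i => |(PySem.List.pyGetD te i ((0 : Int), "")).1 -
                 (PySem.List.pyGetD te (i + 1) ((0 : Int), "")).1|))
    (fun x => x)).getD 0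

def cari_beda_ketinggian (n : Int) (ketinggian : List Int) : Int :=
  if n < 2 then 0
  else
    pvMaxDiffs
      (((PySem.List.pyRange 1 (n - 1) 1).foldl (pvAppendA ketinggian)
          [(PySem.List.pyGetD ketinggian 0 0,
            if PySem.List.pyGetD ketinggian 0 0 ≥ PySem.List.pyGetD ketinggian 1 0
            then "puncak" else "lembah")])
        ++ [(PySem.List.pyGetD ketinggian (-1) 0,
             if PySem.List.pyGetD ketinggian (-1) 0 ≥ PySem.List.pyGetD ketinggian (-2) 0
             then "puncak" else "lembah")])

-- ===== PORT B =====
-- loop body of B: fold a qualifying extreme into the (prev, best) state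
def pvStepB (ks : List Int) (st : Int × Int) (i : Int) : Int × Int :=
  let a := PySem.List.pyGetD ks (i - 1) 0
  let b := PySem.List.pyGetD ks i 0
  let c := PySem.List.pyGetD ks (i + 1) 0
  if (b - a) * (b - c) ≥ 0 ∧ ¬(a = b ∧ b = c) then
    let d := |b - st.1|
    (b, if d > st.2 then d else st.2)
  else st

-- B's tail: 'd = abs(ketinggian[-1] - prev); return best if best > d else d'
def pvFinishB (st : Int × Int) (last : Int) : Int :=
  if st.2 > |last - st.1| then st.2 else |last - st.1|

def cari_beda_ketinggian_alt (n : Int) (ketinggian : List Int) : Int :=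
  if n < 2 then 0
  else
    pvFinishB
      ((PySem.List.pyRange 1 (n - 1) 1).foldl (pvStepB ketinggian)
        (PySem.List.pyGetD ketinggian 0 0, 0))
      (PySem.List.pyGetD ketinggian (-1) 0)

-- ===== PRECONDITION & SPEC =====
-- Exactly where the Python A returns: for n ≥ 2 it indexes ketinggian[0..n-1] (IndexError when n > len)
def Pre_cari_beda_ketinggian (n : Int) (ketinggian : List Int) : Prop :=
  n < 2 ∨ n ≤ (ketinggian.length : Int)
instance (n : Int) (ketinggian : List Int) : Decidable (Pre_cari_beda_ketinggian n ketinggian) := by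
  unfold Pre_cari_beda_ketinggian; infer_instance
def pvWitness_cari_beda_ketinggian : Int × List Int := (3, [1, 5, 2])

def Spec_cari_beda_ketinggian (n : Int) (ketinggian : List Int) (out : Int) : Prop := out = cari_beda_ketinggian_alt n ketinggian
instance (n : Int) (ketinggian : List Int) (out : Int) : Decidable (Spec_cari_beda_ketinggian n ketinggian out) := by unfold Spec_cari_beda_ketinggian; infer_instance

-- ===== CLAIM (what is proved, stated in full; the proofs are below) =====
def Claim_equal_cari_beda_ketinggian : Prop := ∀ (n : Int) (ketinggian : List Int), Dom_cari_beda_ketinggian n ketinggian → Pre_cari_beda_ketinggian n ketinggian → Spec_cari_beda_ketinggian n ketinggian (cari_beda_ketinggian n ketinggian)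

-- ===== LEMMAS AND PROOFS =====

-- last element with default 0 (proof-side helper)
def pvLastD : List Int → Int
  | [] => 0
  | [a] => a
  | _ :: b :: r => pvLastD (b :: r)

-- max of |consecutive differences|, 0 for short lists
def pvMcd : List Int → Int
  | a :: b :: r => max |a - b| (pvMcd (b :: r))
  | _ => 0

-- list of |consecutive differences|
def pvDiffL : List Int → List Int
  | a :: b :: r => |a - b| :: pvDiffL (b :: r)
  | _ => []

-- value-level shadow of A's loop body, phrased with B's condition
def pvStepV (ks : List Int) (vs : List Int) (i : Int) : List Int :=
  let a := PySem.List.pyGetD ks (i - 1) 0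
  let b := PySem.List.pyGetD ks i 0
  let c := PySem.List.pyGetD ks (i + 1) 0
  if (b - a) * (b - c) ≥ 0 ∧ ¬(a = b ∧ b = c) then vs ++ [b] else vs

theorem pvCond_iff (a b c : Int) :
    ((b - a) * (b - c) ≥ 0 ∧ ¬(a = b ∧ b = c)) ↔
      ((b ≥ a ∧ b ≥ c) ∧ (b > a ∨ b > c)) ∨
      (¬(b ≥ a ∧ b ≥ c) ∧ (b ≤ a ∧ b ≤ c) ∧ (b < a ∨ b < c)) := by
  rw [ge_iff_le, mul_nonneg_iff]
  omega

theorem pvMapFst_stepA (ks : List Int) (L : List (Int × String)) (i : Int) :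
    (pvAppendA ks L i).map Prod.fst = pvStepV ks (L.map Prod.fst) i := by
  simp only [pvAppendA, pvStepV]
  by_cases hc : (PySem.List.pyGetD ks i 0 - PySem.List.pyGetD ks (i - 1) 0) *
      (PySem.List.pyGetD ks i 0 - PySem.List.pyGetD ks (i + 1) 0) ≥ 0 ∧
      ¬(PySem.List.pyGetD ks (i - 1) 0 = PySem.List.pyGetD ks i 0 ∧
        PySem.List.pyGetD ks i 0 = PySem.List.pyGetD ks (i + 1) 0)
  · rw [if_pos hc, pvCond_iff] at *
    split_ifs with h1 h2 h3 h4
    · simp [List.map_append]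
    · exfalso; omega
    · simp [List.map_append]
    · exfalso; omega
    · exfalso; omega
  · rw [if_neg hc, pvCond_iff] at *
    split_ifs with h1 h2 h3 h4
    · exfalso; omega
    · rfl
    · exfalso; omega
    · rfl
    · rfl

theorem pvFoldA_mapFst (ks : List Int) (rng : List Int) (L : List (Int × String)) :
    (rng.foldl (pvAppendA ks) L).map Prod.fst = rng.foldl (pvStepV ks) (L.map Prod.fst) := by
  induction rng generalizing L with
  | nil => rfl
  | cons i t ih => simp only [List.foldl_cons, ih, pvMapFst_stepA]

theorem pvStepV_ne_nil (ks vs : List Int) (i : Int) (h : vs ≠ []) : pvStepV ks vs i ≠ [] := by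
  simp only [pvStepV]
  split <;> simp_all

theorem pvFoldV_ne_nil (ks rng vs : List Int) (h : vs ≠ []) :
    rng.foldl (pvStepV ks) vs ≠ [] := by
  induction rng generalizing vs with
  | nil => exact h
  | cons i t ih => exact ih _ (pvStepV_ne_nil ks vs i h)

theorem pvLastD_append (vs : List Int) (x : Int) (h : vs ≠ []) :
    pvLastD (vs ++ [x]) = x := by
  induction vs with
  | nil => simp at h
  | cons a t ih =>
    cases t with
    | nil => rfl
    | cons b r => exact ih (by simp)

theorem pvMcd_append (vs : List Int) (x : Int) (h : vs ≠ []) :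
    pvMcd (vs ++ [x]) = max (pvMcd vs) |pvLastD vs - x| := by
  induction vs with
  | nil => simp at h
  | cons a t ih =>
    cases t with
    | nil =>
      simp [pvMcd, pvLastD]
    | cons b r =>
      have h2 := ih (by simp)
      simp only [List.cons_append, pvMcd, pvLastD] at *
      rw [h2, max_assoc]

theorem pvFoldB_rel (ks : List Int) (rng : List Int) (vs : List Int) (h : vs ≠ []) :
    rng.foldl (pvStepB ks) (pvLastD vs, pvMcd vs) =
      (pvLastD (rng.foldl (pvStepV ks) vs), pvMcd (rng.foldl (pvStepV ks) vs)) := by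
  induction rng generalizing vs with
  | nil => rfl
  | cons i t ih =>
    simp only [List.foldl_cons]
    by_cases hc : (PySem.List.pyGetD ks i 0 - PySem.List.pyGetD ks (i - 1) 0) *
        (PySem.List.pyGetD ks i 0 - PySem.List.pyGetD ks (i + 1) 0) ≥ 0 ∧
        ¬(PySem.List.pyGetD ks (i - 1) 0 = PySem.List.pyGetD ks i 0 ∧
          PySem.List.pyGetD ks i 0 = PySem.List.pyGetD ks (i + 1) 0)
    · have hB : pvStepB ks (pvLastD vs, pvMcd vs) i =
          (pvLastD (vs ++ [PySem.List.pyGetD ks i 0]), pvMcd (vs ++ [PySem.List.pyGetD ks i 0])) := by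
        simp only [pvStepB, if_pos hc]
        rw [pvLastD_append _ _ h, pvMcd_append _ _ h, abs_sub_comm (pvLastD vs)]
        refine Prod.ext rfl ?_
        simp [max_def]
        omega
      have hV : pvStepV ks vs i = vs ++ [PySem.List.pyGetD ks i 0] := by
        simp only [pvStepV, if_pos hc]
      rw [hB, hV]
      exact ih _ (by simp)
    · have hB : pvStepB ks (pvLastD vs, pvMcd vs) i = (pvLastD vs, pvMcd vs) := by
        simp only [pvStepB, if_neg hc]
      have hV : pvStepV ks vs i = vs := by simp only [pvStepV, if_neg hc]
      rw [hB, hV]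
      exact ih _ h

theorem pvDiffMap_nat (te : List (Int × String)) :
    (List.range (te.length - 1)).map
      (fun k => |(te.getD k ((0 : Int), "")).1 - (te.getD (k + 1) ((0 : Int), "")).1|) =
    pvDiffL (te.map Prod.fst) := by
  induction te with
  | nil => rfl
  | cons x t ih =>
    cases t with
    | nil => rfl
    | cons y r =>
      have hl : (x :: y :: r).length - 1 = ((y :: r).length - 1) + 1 := by simp
      rw [hl, List.range_succ_eq_map, List.map_cons, List.map_map]
      simp only [List.map_cons, pvDiffL]
      refine congrArg₂ _ ?_ ?_
      · simp
      · rw [show (y.1 :: List.map Prod.fst r) = List.map Prod.fst (y :: r) from rfl, ← ih]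
        refine List.map_congr_left fun k _ => ?_
        simp [Function.comp]

theorem pvFoldlMax_assoc (l : List Int) (x y : Int) :
    l.foldl max (max x y) = max x (l.foldl max y) := List.foldl_assoc

theorem pvMaxD_diffL (vs : List Int) :
    (PySem.List.max? (pvDiffL vs) (fun x => x)).getD 0 = pvMcd vs := by
  induction vs with
  | nil => rfl
  | cons a t ih =>
    cases t with
    | nil => rfl
    | cons b r =>
      simp only [pvDiffL, pvMcd] at *
      rw [PySem.List.max?_id_cons]
      cases hr : pvDiffL (b :: r) with
      | nil =>
        cases r with
        | nil => simp [pvMcd, abs_nonneg]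
        | cons c r' => simp [pvDiffL] at hr
      | cons z d =>
        rw [hr, PySem.List.max?_id_cons] at ih
        simp only [Option.getD_some] at ih
        simp only [List.foldl_cons, pvFoldlMax_assoc, ih, Option.getD_some]

theorem pvMaxDiffs_eq_mcd (te : List (Int × String)) :
    pvMaxDiffs te = pvMcd (te.map Prod.fst) := by
  unfold pvMaxDiffs
  rw [PySem.List.pyRange_one, List.map_map, ← pvMaxD_diffL, ← pvDiffMap_nat]
  have ht : ((te.length : Int) - 1 - 0).toNat = te.length - 1 := by omega
  congr 1
  congr 1
  rw [ht]
  refine List.map_congr_left fun k hk => ?_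
  simp only [Function.comp, zero_add]
  have h1 : ((k : Int) + 1) = ((k + 1 : Nat) : Int) := by push_cast; ring
  rw [h1, PySem.List.pyGetD_natCast, PySem.List.pyGetD_natCast]

-- ===== VERDICT (by name: the statement is the Claim_ definition above) =====
theorem cari_beda_ketinggian_spec : Claim_equal_cari_beda_ketinggian := by
  intro n ks _ hpre
  unfold Spec_cari_beda_ketinggian cari_beda_ketinggian cari_beda_ketinggian_alt
  by_cases hn : n < 2
  · simp [hn]
  · simp only [if_neg hn]
    have hne : [PySem.List.pyGetD ks 0 0] ≠ ([] : List Int) := by simp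
    have hw := pvFoldV_ne_nil ks (PySem.List.pyRange 1 (n - 1) 1) [PySem.List.pyGetD ks 0 0] hne
    rw [pvMaxDiffs_eq_mcd, List.map_append, pvFoldA_mapFst]
    simp only [List.map_cons, List.map_nil]
    rw [pvMcd_append _ _ hw,
        show ((PySem.List.pyGetD ks 0 0 : Int), (0 : Int)) =
          (pvLastD [PySem.List.pyGetD ks 0 0], pvMcd [PySem.List.pyGetD ks 0 0]) from rfl,
        pvFoldB_rel ks _ _ hne]
    unfold pvFinishB
    rw [abs_sub_comm (PySem.List.pyGetD ks (-1) 0)]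
    simp only [max_def]
    split_ifs <;> omega
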